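-- pv_equiv track=rewrite | github.com/faterazer/LeetCode | 3806. Maximum Bitwise AND After Increment Operations/Solution.py | maximumAND
-- ===== SOURCE A (Python) =====
-- def maximumAND(nums: list[int], k: int, m: int) -> int:
--     nums.sort()
--     if nums[-m] == nums[-1]:
--         return nums[-1] + k // m
--
--     n = len(nums)
--     ops = [0] * n
--     max_width = (nums[-1] + k // m).bit_length()
--     result = 0
--     for bit in range(max_width - 1, -1, -1):
--         target = result | (1 << bit)
--         for i, x in enumerate(nums):
--             b = (target & ~x).bit_length()
--             mask = (1 << b) - 1
--             ops[i] = (target & mask) - (x & mask)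
--         ops.sort()
--         if sum(ops[:m]) <= k:
--             result = target
--     return result
-- ===== SOURCE B (Python) =====
-- def med3(x, y, z):
--     if x <= y:
--         if y <= z:
--             return y
--         return z if x <= z else x
--     if x <= z:
--         return x
--     return z if y <= z else y
--
--
-- def pivot_of(a):
--     n = len(a)
--     if n < 9:
--         return a[n // 2]
--     return med3(med3(a[0], a[n // 8], a[n // 4]),
--                 med3(a[3 * n // 8], a[n // 2], a[5 * n // 8]),
--                 med3(a[3 * n // 4], a[7 * n // 8], a[n - 1]))
--
--
-- def smallest_sum(a, m):
--     acc = 0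
--     while True:
--         if m <= 0:
--             return acc
--         if m >= len(a):
--             return acc + sum(a)
--         p = pivot_of(a)
--         lo = [x for x in a if x < p]
--         if m <= len(lo):
--             a = lo
--             continue
--         eq = [x for x in a if x == p]
--         if m <= len(lo) + len(eq):
--             return acc + sum(lo) + p * (m - len(lo))
--         acc += sum(lo) + sum(eq)
--         m -= len(lo) + len(eq)
--         a = [x for x in a if x > p]
--
--
-- def op_cost(target, x):
--     b = (target & ~x).bit_length()
--     mask = (1 << b) - 1
--     return (target & mask) - (x & mask)
--
--
-- def maximumAND(nums, k, m):
--     nums.sort()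
--     if nums[-m] == nums[-1]:
--         return nums[-1] + k // m
--
--     result = 0
--     for bit in range((nums[-1] + k // m).bit_length() - 1, -1, -1):
--         target = result | (1 << bit)
--         ops = [op_cost(target, x) for x in nums]
--         if smallest_sum(ops, m) <= k:
--             result = target
--     return result
-- ===== Notes on version B (the rewrite author's own statement) =====
-- stated objective: alternative
-- what changed: Each bit iteration's full sort of the cost array followed by summing its first m entries is replaced by an iterative three-way quickselect (ninther pivot) that accumulates the sum of the m smallest costs without ever sorting.
-- outside the precondition, e.g. on maximumAND([1, 5, 9], 3, -1): A returns 4, B returns 7; on maximumAND([1, 2], 0, -1): A returns 2, B returns 2; on maximumAND([1], 0, 0): A raises ZeroDivisionError, B raises ZeroDivisionError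
import Mathlib
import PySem

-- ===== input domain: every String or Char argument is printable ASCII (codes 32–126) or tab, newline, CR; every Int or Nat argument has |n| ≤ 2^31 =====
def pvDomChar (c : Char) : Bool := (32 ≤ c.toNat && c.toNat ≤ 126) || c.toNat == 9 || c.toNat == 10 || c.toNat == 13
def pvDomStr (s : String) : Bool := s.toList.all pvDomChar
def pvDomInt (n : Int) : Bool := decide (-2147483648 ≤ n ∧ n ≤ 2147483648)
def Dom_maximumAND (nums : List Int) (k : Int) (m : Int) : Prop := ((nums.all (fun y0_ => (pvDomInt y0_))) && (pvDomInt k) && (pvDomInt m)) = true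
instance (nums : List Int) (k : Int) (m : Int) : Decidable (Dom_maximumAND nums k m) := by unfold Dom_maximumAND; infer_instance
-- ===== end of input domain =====

-- B replaces A's per-bit full sort of the cost array by an iterative three-way
-- quickselect (ninther pivot) that sums the m smallest costs directly
-- (objective: alternative algorithm; not measured faster in CPython).
-- Both A and B sort `nums` in place (same side effect); the equivalence proved
-- here is about the return value.


-- ===== PORT A =====
def maximumAND (nums : List Int) (k : Int) (m : Int) : Int :=
  let s := PySem.List.sorted nums (fun x => x) false
  let last := PySem.List.pyGetD s (-1) 0
  if PySem.List.pyGetD s (-m) 0 = last then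
    last + PySem.Int.floordiv k m
  else
    let maxWidth : Nat := PySem.Int.bitLength (last + PySem.Int.floordiv k m)
    (PySem.List.pyRange ((maxWidth : Int) - 1) (-1) (-1)).foldl
      (fun result bit =>
        let target := PySem.Int.bor result ((1 : Int) <<< bit.toNat)
        -- the inner for-loop fills ops[i] for every i, then ops.sort():
        -- net effect is the sorted list of the per-element costs
        let ops := PySem.List.sorted (s.map (fun x =>
            let b := PySem.Int.bitLength (PySem.Int.band target (Int.not x))
            let mask := ((1 : Int) <<< b) - 1
            PySem.Int.band target mask - PySem.Int.band x mask)) (fun x => x) false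
        if (PySem.List.slice ops none (some m)).sum ≤ k then target else result) 0

-- ===== PORT B =====
-- termination helpers for smallestSumGo (cited in its decreasing_by)
def med3 (x y z : Int) : Int :=
  if x ≤ y then (if y ≤ z then y else if x ≤ z then z else x)
  else (if x ≤ z then x else if y ≤ z then z else y)

-- all list indices below are in range (n ≥ 9 in the else branch), so getD is exact
def pivotOf (a : List Int) : Int :=
  let n := a.length
  if n < 9 then a.getD (n / 2) 0
  else
    med3 (med3 (a.getD 0 0) (a.getD (n / 8) 0) (a.getD (n / 4) 0))
         (med3 (a.getD (3 * n / 8) 0) (a.getD (n / 2) 0) (a.getD (5 * n / 8) 0))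
         (med3 (a.getD (3 * n / 4) 0) (a.getD (7 * n / 8) 0) (a.getD (n - 1) 0))

lemma med3_mem (x y z : Int) : med3 x y z = x ∨ med3 x y z = y ∨ med3 x y z = z := by
  unfold med3; split_ifs <;> simp

lemma getD_mem_of_lt (a : List Int) (i : Nat) (h : i < a.length) : a.getD i 0 ∈ a := by
  rw [List.getD_eq_getElem a 0 h]; exact List.getElem_mem _

lemma pivotOf_mem (a : List Int) (h : 0 < a.length) : pivotOf a ∈ a := by
  unfold pivotOf
  by_cases h9 : a.length < 9
  · simpa [h9] using getD_mem_of_lt a (a.length / 2) (by omega)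
  · simp only [h9, if_false]
    rcases med3_mem (med3 (a.getD 0 0) (a.getD (a.length / 8) 0) (a.getD (a.length / 4) 0))
      (med3 (a.getD (3 * a.length / 8) 0) (a.getD (a.length / 2) 0) (a.getD (5 * a.length / 8) 0))
      (med3 (a.getD (3 * a.length / 4) 0) (a.getD (7 * a.length / 8) 0) (a.getD (a.length - 1) 0))
      with h1 | h1 | h1 <;> rw [h1] <;>
    · rcases med3_mem _ _ _ with h2 | h2 | h2 <;> rw [h2] <;>
        exact getD_mem_of_lt a _ (by omega)

-- iterative three-way quickselect: sum of the m smallest elements of a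
def smallestSumGo (a : List Int) (m : Int) (acc : Int) : Int :=
  if m ≤ 0 then acc
  else if _hlen : (a.length : Int) ≤ m then acc + a.sum
  else
    let p := pivotOf a
    let lo := a.filter (fun x => x < p)
    if m ≤ (lo.length : Int) then smallestSumGo lo m acc
    else
      let eqv := a.filter (fun x => x = p)
      if m ≤ (lo.length : Int) + (eqv.length : Int) then
        acc + lo.sum + p * (m - lo.length)
      else
        smallestSumGo (a.filter (fun x => p < x)) (m - lo.length - eqv.length)
          (acc + lo.sum + eqv.sum)
termination_by a.length
decreasing_by
  all_goals
    have hmem : pivotOf a ∈ a := pivotOf_mem a (by omega)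
    simpa using List.length_filter_lt_length_iff_exists.mpr
      ⟨⟨_, hmem⟩, List.mem_attach _ _, by simp⟩

def opCost (target : Int) (x : Int) : Int :=
  let b := PySem.Int.bitLength (PySem.Int.band target (Int.not x))
  let mask := ((1 : Int) <<< b) - 1
  PySem.Int.band target mask - PySem.Int.band x mask

def maximumAND_alt (nums : List Int) (k : Int) (m : Int) : Int :=
  let s := PySem.List.sorted nums (fun x => x) false
  let last := PySem.List.pyGetD s (-1) 0
  if PySem.List.pyGetD s (-m) 0 = last then
    last + PySem.Int.floordiv k m
  else
    (PySem.List.pyRange ((PySem.Int.bitLength (last + PySem.Int.floordiv k m) : Int) - 1) (-1) (-1)).foldl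
      (fun result bit =>
        let target := PySem.Int.bor result ((1 : Int) <<< bit.toNat)
        let ops := s.map (opCost target)
        if smallestSumGo ops m 0 ≤ k then target else result) 0

-- ===== PRECONDITION & SPEC =====
-- Pre_ restricts to the problem's natural domain 1 ≤ m ≤ len(nums); outside it A
-- raises (ZeroDivisionError for m = 0, IndexError for m > len or m < -(len-1)) or,
-- for negative m, returns a value produced by negative-index/negative-slice
-- wraparound outside the task's meaningful inputs.
def Pre_maximumAND (nums : List Int) (_k : Int) (m : Int) : Prop :=
  1 ≤ m ∧ m ≤ (nums.length : Int)
instance (nums : List Int) (k : Int) (m : Int) : Decidable (Pre_maximumAND nums k m) := by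
  unfold Pre_maximumAND; infer_instance

def pvWitness_maximumAND : List Int × Int × Int := ([1, 5, 9], 3, 2)

def Spec_maximumAND (nums : List Int) (k : Int) (m : Int) (out : Int) : Prop := out = maximumAND_alt nums k m
instance (nums : List Int) (k : Int) (m : Int) (out : Int) : Decidable (Spec_maximumAND nums k m out) := by unfold Spec_maximumAND; infer_instance

-- ===== CLAIM (what is proved, stated in full; the proofs are below) =====
def Claim_equal_maximumAND : Prop := ∀ (nums : List Int) (k : Int) (m : Int), Dom_maximumAND nums k m → Pre_maximumAND nums k m → Spec_maximumAND nums k m (maximumAND nums k m)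

-- ===== LEMMAS AND PROOFS =====

-- the three filters around a pivot are a permutation of the list
lemma filter3_perm (a : List Int) (p : Int) :
    (a.filter (fun x => x < p) ++ (a.filter (fun x => x = p) ++ a.filter (fun x => p < x))).Perm a := by
  induction a with
  | nil => simp
  | cons y t ih =>
    rcases lt_trichotomy y p with h | h | h
    · simp only [List.filter_cons, h, h.ne, not_lt.mpr h.le, decide_true, decide_false,
        if_true, Bool.false_eq_true, if_false, List.cons_append]
      exact ih.cons y
    · subst h
      simp only [List.filter_cons, lt_irrefl, decide_true, decide_false, Bool.false_eq_true,
        if_true, if_false]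
      exact List.perm_middle.trans (ih.cons y)
    · simp only [List.filter_cons, h, h.ne', not_lt.mpr h.le, decide_true, decide_false,
        Bool.false_eq_true, if_true, if_false]
      exact (List.Perm.append_left _ List.perm_middle).trans
        (List.perm_middle.trans (ih.cons y))

-- sorted of a list decomposes around any pivot that occurs in it
lemma sorted_decomp (a : List Int) (p : Int) :
    PySem.List.sorted a (fun x => x) false =
      PySem.List.sorted (a.filter (fun x => x < p)) (fun x => x) false ++
      (a.filter (fun x => x = p) ++
       PySem.List.sorted (a.filter (fun x => p < x)) (fun x => x) false) := by
  apply PySem.List.sorted_id_eq_of_perm_of_pairwise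
  · refine List.Perm.trans ?_ (filter3_perm a p)
    exact ((PySem.List.sorted_perm _ _ _).append
      ((List.Perm.refl _).append (PySem.List.sorted_perm _ _ _)))
  · have hlo : ∀ x ∈ PySem.List.sorted (a.filter (fun x => x < p)) (fun x => x) false, x < p := by
      intro x hx
      have := (PySem.List.mem_sorted _ _ _ _).mp hx
      simpa using (List.mem_filter.mp this).2
    have heq : ∀ x ∈ a.filter (fun x => x = p), x = p := by
      intro x hx; simpa using (List.mem_filter.mp hx).2
    have hhi : ∀ x ∈ PySem.List.sorted (a.filter (fun x => p < x)) (fun x => x) false, p < x := by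
      intro x hx
      have := (PySem.List.mem_sorted _ _ _ _).mp hx
      simpa using (List.mem_filter.mp this).2
    rw [List.pairwise_append]
    refine ⟨by simpa using PySem.List.sorted_pairwise (a.filter (fun x => x < p)) (fun x => x), ?_, ?_⟩
    · rw [List.pairwise_append]
      refine ⟨?_, by simpa using PySem.List.sorted_pairwise (a.filter (fun x => p < x)) (fun x => x), ?_⟩
      · exact List.pairwise_of_forall_mem_list (fun x hx y hy => by rw [heq x hx, heq y hy])
      · intro x hx y hy; rw [heq x hx]; exact (hhi y hy).le
    · intro x hx y hy
      rcases List.mem_append.mp hy with hy | hy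
      · rw [heq y hy]; exact (hlo x hx).le
      · exact ((hlo x hx).trans (hhi y hy)).le

lemma sum_of_all_eq (l : List Int) (p : Int) (h : ∀ x ∈ l, x = p) :
    l.sum = p * l.length := by
  induction l with
  | nil => simp
  | cons y t ih =>
    rw [List.sum_cons, ih (fun x hx => h x (by simp [hx])), h y (by simp), List.length_cons]
    push_cast; ring

lemma sorted_id_sum (l : List Int) :
    (PySem.List.sorted l (fun x => x) false).sum = l.sum :=
  (PySem.List.sorted_perm l (fun x => x) false).sum_eq

-- quickselect computes acc + (sum of the m smallest elements)
lemma smallestSumGo_eq (a : List Int) (m acc : Int) :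
    smallestSumGo a m acc =
      acc + ((PySem.List.sorted a (fun x => x) false).take m.toNat).sum := by
  suffices H : ∀ (n : Nat) (a : List Int) (m acc : Int), a.length = n →
      smallestSumGo a m acc =
        acc + ((PySem.List.sorted a (fun x => x) false).take m.toNat).sum from
    H a.length a m acc rfl
  intro n
  induction n using Nat.strong_induction_on with
  | _ n ih =>
    intro a m acc hn
    rw [smallestSumGo]
    by_cases hm : m ≤ 0
    · rw [if_pos hm]
      have : m.toNat = 0 := by omega
      simp [this]
    rw [if_neg hm]
    by_cases hlen : (a.length : Int) ≤ m
    · rw [dif_pos hlen]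
      rw [List.take_of_length_le (by rw [PySem.List.length_sorted]; omega), sorted_id_sum]
    rw [dif_neg hlen]
    have hmem : pivotOf a ∈ a := pivotOf_mem a (by omega)
    set p := pivotOf a with hp
    have hlolen : (a.filter (fun x => x < p)).length < a.length :=
      List.length_filter_lt_length_iff_exists.mpr ⟨p, hmem, by simp⟩
    have hhilen : (a.filter (fun x => p < x)).length < a.length :=
      List.length_filter_lt_length_iff_exists.mpr ⟨p, hmem, by simp⟩
    have hslo : (PySem.List.sorted (a.filter (fun x => x < p)) (fun x => x) false).length
        = (a.filter (fun x => x < p)).length := PySem.List.length_sorted _ _ _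
    by_cases hmlo : m ≤ ((a.filter (fun x => x < p)).length : Int)
    · rw [if_pos hmlo, ih _ (hn ▸ hlolen) _ m acc rfl, sorted_decomp a p,
        List.take_append_of_le_length (by rw [hslo]; omega)]
    rw [if_neg hmlo]
    by_cases hmeq : m ≤ ((a.filter (fun x => x < p)).length : Int) + ((a.filter (fun x => x = p)).length : Int)
    · rw [if_pos hmeq, sorted_decomp a p, List.take_append,
        List.take_of_length_le (by rw [hslo]; omega),
        List.take_append_of_le_length (by rw [hslo]; omega), hslo]
      rw [List.sum_append, sorted_id_sum,
        sum_of_all_eq ((a.filter (fun x => x = p)).take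
            (m.toNat - (a.filter (fun x => x < p)).length)) p
          (fun x hx => by
            have := List.mem_of_mem_take hx
            simpa using (List.mem_filter.mp this).2),
        List.length_take]
      have hmin : ((min (m.toNat - (a.filter (fun x => x < p)).length)
            (a.filter (fun x => x = p)).length : Nat) : Int)
          = m - (a.filter (fun x => x < p)).length := by omega
      rw [hmin]; ring
    · rw [if_neg hmeq, sorted_decomp a p, List.take_append,
        List.take_of_length_le (by rw [hslo]; omega), hslo, List.take_append,
        List.take_of_length_le (by omega), ih _ (hn ▸ hhilen) _ _ _ rfl]
      rw [List.sum_append, List.sum_append, sorted_id_sum]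
      have : (m - ((a.filter (fun x => x < p)).length : Int) - ((a.filter (fun x => x = p)).length : Int)).toNat
          = m.toNat - (a.filter (fun x => x < p)).length - (a.filter (fun x => x = p)).length := by omega
      rw [this]; ring

-- A's per-bit test equals B's per-bit test
lemma cost_eq (ops : List Int) (m : Int) (hm : 0 ≤ m) :
    (PySem.List.slice (PySem.List.sorted ops (fun x => x) false) none (some m)).sum
      = smallestSumGo ops m 0 := by
  rw [PySem.List.slice_to _ hm, smallestSumGo_eq]; ring

-- ===== VERDICT (by name: the statement is the Claim_ definition above) =====
theorem maximumAND_spec : Claim_equal_maximumAND := by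
  intro nums k m _ hpre
  unfold Spec_maximumAND maximumAND maximumAND_alt
  dsimp only
  split
  · rfl
  · congr 1
    funext result bit
    rw [cost_eq _ m (le_trans (by norm_num) hpre.1)]
    rfl
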